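-- pv_equiv track=rewrite | github.com/yanisadel/Flamb | flamb/tensor/_functions.py | _loop_on_indicies
-- ===== SOURCE A (Python) =====
-- def _loop_on_indicies(shape):
--     nb_dim = len(shape)
--     size = 1
--     for elt in shape:
--         size *= elt
--     index = [0] * nb_dim
--     # Indicateur pour savoir quand arrêter de parcourir l'array
--     done = False
--     if size == 0:
--         done = True
--     # Tant que nous n'avons pas fini de parcourir l'array
--     while not done:
--         yield tuple(index)
--         index[-1] += 1
--         for i in reversed(range(nb_dim)):
--             if index[i] >= shape[i]:
--                 index[i] = 0
--                 # Si nous sommes à la dernière dimension, nous avons fini de parcourir l'array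
--                 if i == 0:
--                     done = True
--
--                 # Sinon, nous passons à la dimension suivante
--                 else:
--                     index[i - 1] += 1
-- ===== SOURCE B (Python) =====
-- def _loop_on_indicies(shape):
--     size = 1
--     for d in shape:
--         if d <= 0:
--             return          # a nonpositive dimension has no valid index
--         size *= d
--     for f in range(size):
--         digits = []
--         for d in reversed(shape):
--             f, r = divmod(f, d)
--             digits.append(r)
--         yield tuple(reversed(digits))
-- ===== Notes on version B (the rewrite author's own statement) =====
-- stated objective: simpler
-- what changed: Replaces the mutable odometer index with its increment-and-carry scan by scalar unranking: a single flat counter over range(product(shape)) is decoded into each multi-index with divmod over the dimensions from last to first.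
-- outside the precondition, e.g. on _loop_on_indicies([-2]): A returns [(0,)], B returns []; on _loop_on_indicies([3, -1, 2]): A returns [(0, 0, 0), (1, 0, 1), (2, 0, 0)], B returns []
import Mathlib
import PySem

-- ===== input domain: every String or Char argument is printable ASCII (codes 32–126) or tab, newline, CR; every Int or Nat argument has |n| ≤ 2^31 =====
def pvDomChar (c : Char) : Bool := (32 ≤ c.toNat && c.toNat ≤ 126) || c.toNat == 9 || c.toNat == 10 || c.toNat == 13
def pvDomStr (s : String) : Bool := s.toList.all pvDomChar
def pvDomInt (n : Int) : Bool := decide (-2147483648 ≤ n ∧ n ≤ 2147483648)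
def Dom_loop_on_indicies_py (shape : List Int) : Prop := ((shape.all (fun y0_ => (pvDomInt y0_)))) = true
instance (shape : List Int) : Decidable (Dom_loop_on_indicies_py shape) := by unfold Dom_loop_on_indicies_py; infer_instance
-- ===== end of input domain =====

-- B replaces A's mutable odometer index and carry scan by scalar unranking of a flat counter (different decomposition, not faster); return-value equivalence of the materialized generator outputs.


-- ===== PORT A =====
-- inner 'for i in reversed(range(nb_dim))' carry loop; first argument counts i = k-1, k-2, …, 0
def pvInnerA (shape : List Int) : Nat → (List Int × Bool) → (List Int × Bool)
  | 0, st => st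
  | k + 1, (idx, done) =>
    if idx.getD k 0 ≥ shape.getD k 0 then
      let idx2 := idx.set k 0
      if k = 0 then pvInnerA shape k (idx2, true)
      else pvInnerA shape k (idx2.set (k - 1) (idx2.getD (k - 1) 0 + 1), done)
    else pvInnerA shape k (idx, done)

-- the 'while not done' loop; fuel is only a totality device (the loop runs at most fuel times)
def pvMainA (shape : List Int) : Nat → List Int → List (List Int) → List (List Int)
  | 0, _, acc => acc.reverse
  | fuel + 1, idx, acc =>
    let acc' := idx :: acc                       -- yield tuple(index)
    let n := shape.length
    if n = 0 then acc'.reverse                   -- Python raises IndexError at 'index[-1] += 1' here (empty shape; excluded by Pre_)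
    else
      let idx1 := idx.set (n - 1) (idx.getD (n - 1) 0 + 1)   -- index[-1] += 1
      let st := pvInnerA shape n (idx1, false)
      if st.2 then acc'.reverse else pvMainA shape fuel st.1 acc'

def loop_on_indicies_py (shape : List Int) : List (List Int) :=
  let nbDim := shape.length
  let size := shape.foldl (· * ·) 1
  if size = 0 then []
  else
    -- fuel ∏ max(dᵢ,1) bounds the number of while-iterations on every input
    pvMainA shape ((shape.map (fun d => max d 1)).foldl (· * ·) 1).toNat (List.replicate nbDim 0) []

-- ===== PORT B =====
-- decode one flat counter f: divmod by the dimensions from last to first, collect remainders, reverse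
def pvDecodeB (shape : List Int) (f : Int) : List Int :=
  let st := shape.reverse.foldl
    (fun (st : List Int × Int) d => (st.1 ++ [PySem.Int.mod st.2 d], PySem.Int.floordiv st.2 d)) ([], f)
  st.1.reverse

-- the size loop with its early 'return': none = B yields nothing (a nonpositive dimension has no valid index)
def pvSizeGo : List Int → Int → Option Int
  | [], size => some size
  | d :: ds, size => if d ≤ 0 then none else pvSizeGo ds (size * d)

def loop_on_indicies_py_alt (shape : List Int) : List (List Int) :=
  match pvSizeGo shape 1 with
  | none => []
  | some size => (PySem.List.pyRange 0 size 1).map (pvDecodeB shape)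

-- ===== PRECONDITION & SPEC =====
-- Pre_ excludes the empty shape, on which A raises IndexError ('index[-1] += 1' on the empty index list) after its first
-- yield, and zero-free shapes containing a negative dimension: those are malformed input (not a valid shape), on which A's
-- carry scan returns accidental enumerations (the test 'index[i] >= shape[i]' fires spuriously on every pass) that no
-- natural re-implementation can match; B yields nothing there, since a nonpositive dimension has no valid index.
def Pre_loop_on_indicies_py (shape : List Int) : Prop := shape ≠ [] ∧ ((0:Int) ∈ shape ∨ ∀ d ∈ shape, 0 ≤ d)
instance (shape : List Int) : Decidable (Pre_loop_on_indicies_py shape) := by unfold Pre_loop_on_indicies_py; infer_instance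
def pvWitness_loop_on_indicies_py : List Int := [2, 3]

def Spec_loop_on_indicies_py (shape : List Int) (out : List (List Int)) : Prop := out = loop_on_indicies_py_alt shape
instance (shape : List Int) (out : List (List Int)) : Decidable (Spec_loop_on_indicies_py shape out) := by unfold Spec_loop_on_indicies_py; infer_instance

-- ===== CLAIM (what is proved, stated in full; the proofs are below) =====
def Claim_equal_loop_on_indicies_py : Prop := ∀ (shape : List Int), Dom_loop_on_indicies_py shape → Pre_loop_on_indicies_py shape → Spec_loop_on_indicies_py shape (loop_on_indicies_py shape)

-- ===== LEMMAS AND PROOFS =====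

-- the running product 'size'
def pvProd (l : List Int) : Int := l.foldl (· * ·) 1

theorem pvFoldlMul (l : List Int) : ∀ a : Int, l.foldl (· * ·) a = a * l.foldl (· * ·) 1 := by
  induction l with
  | nil => intro a; simp
  | cons d l ih => intro a; simp only [List.foldl_cons]; rw [ih (a * d), ih (1 * d)]; ring

theorem pvProd_cons (d : Int) (l : List Int) : pvProd (d :: l) = d * pvProd l := by
  simp only [pvProd, List.foldl_cons]; rw [pvFoldlMul l (1 * d)]; ring

theorem pvProd_snoc (l : List Int) (d : Int) : pvProd (l ++ [d]) = pvProd l * d := by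
  simp only [pvProd, List.foldl_append, List.foldl_cons, List.foldl_nil]

theorem pvProd_pos (l : List Int) (h : ∀ d ∈ l, 0 < d) : 0 < pvProd l := by
  induction l with
  | nil => simp [pvProd]
  | cons d l ih =>
    rw [pvProd_cons]
    exact mul_pos (h d (by simp)) (ih (fun x hx => h x (by simp [hx])))

theorem pvProd_zero_of_mem (l : List Int) (h : (0:Int) ∈ l) : pvProd l = 0 := by
  induction l with
  | nil => simp at h
  | cons d l ih =>
    rw [pvProd_cons]
    rcases List.mem_cons.mp h with h0 | h0
    · rw [← h0]; ring
    · rw [ih h0]; ring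

-- accumulator-append form of B's digit fold
theorem pvFoldAcc (l : List Int) : ∀ (digs : List Int) (f : Int),
    l.foldl (fun (st : List Int × Int) d => (st.1 ++ [PySem.Int.mod st.2 d], PySem.Int.floordiv st.2 d)) (digs, f)
      = (digs ++ (l.foldl (fun (st : List Int × Int) d => (st.1 ++ [PySem.Int.mod st.2 d], PySem.Int.floordiv st.2 d)) ([], f)).1,
         (l.foldl (fun (st : List Int × Int) d => (st.1 ++ [PySem.Int.mod st.2 d], PySem.Int.floordiv st.2 d)) ([], f)).2) := by
  induction l with
  | nil => intro digs f; simp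
  | cons d l ih =>
    intro digs f
    simp only [List.foldl_cons]
    rw [ih (digs ++ [PySem.Int.mod f d]), ih ([] ++ [PySem.Int.mod f d])]
    simp

theorem pvDecode_snoc (ds : List Int) (d f : Int) :
    pvDecodeB (ds ++ [d]) f = pvDecodeB ds (PySem.Int.floordiv f d) ++ [PySem.Int.mod f d] := by
  simp only [pvDecodeB, List.reverse_append, List.reverse_singleton, List.singleton_append, List.foldl_cons]
  rw [pvFoldAcc]
  simp

theorem pvDecode_nil (f : Int) : pvDecodeB [] f = [] := by simp [pvDecodeB]

theorem pvDecode_length (S : List Int) : ∀ f, (pvDecodeB S f).length = S.length := by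
  induction S using List.reverseRecOn with
  | nil => intro f; simp [pvDecode_nil]
  | append_singleton ds d ih => intro f; rw [pvDecode_snoc]; simp [ih]

theorem pvDecode_lt (S : List Int) (h : ∀ d ∈ S, 0 < d) :
    ∀ (f : Int) (i : Nat), i < S.length → (pvDecodeB S f).getD i 0 < S.getD i 0 := by
  induction S using List.reverseRecOn with
  | nil => intro f i hi; simp at hi
  | append_singleton ds d ih =>
    intro f i hi
    have hd : 0 < d := h d (by simp)
    rw [pvDecode_snoc]
    rcases Nat.lt_or_ge i ds.length with hlt | hge
    · rw [List.getD_append _ _ _ _ (by rw [pvDecode_length]; exact hlt), List.getD_append _ _ _ _ hlt]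
      exact ih (fun x hx => h x (by simp [hx])) _ i hlt
    · have hi' : i = ds.length := by
        simp only [List.length_append, List.length_singleton] at hi; omega
      subst hi'
      rw [show ds.length = (pvDecodeB ds (PySem.Int.floordiv f d)).length from (pvDecode_length ds _).symm] 
      rw [List.getD_append_right _ _ _ _ (le_refl _)]
      rw [pvDecode_length]
      rw [List.getD_append_right _ _ _ _ (le_refl _)]
      simp only [Nat.sub_self, List.getD_cons_zero]
      rw [PySem.Int.mod_eq_emod_of_pos hd]
      exact Int.emod_lt_of_pos f hd

theorem pvDecode_zero (S : List Int) (h : ∀ d ∈ S, 0 < d) : pvDecodeB S 0 = List.replicate S.length 0 := by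
  induction S using List.reverseRecOn with
  | nil => simp [pvDecode_nil]
  | append_singleton ds d ih =>
    have hd : 0 < d := h d (by simp)
    rw [pvDecode_snoc]
    rw [PySem.Int.floordiv_eq_ediv_of_pos hd, PySem.Int.mod_eq_emod_of_pos hd]
    simp only [Int.zero_ediv, Int.zero_emod]
    rw [ih (fun x hx => h x (by simp [hx]))]
    simp [List.replicate_succ', List.length_append]

theorem pvMapMax (S : List Int) (h : ∀ d ∈ S, 0 < d) : S.map (fun d => max d 1) = S := by
  induction S with
  | nil => simp
  | cons d l ih =>
    simp only [List.map_cons]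
    rw [ih (fun x hx => h x (by simp [hx]))]
    have : max d 1 = d := by have := h d (by simp); omega
    rw [this]

-- the inner loop does nothing on an in-range index
theorem pvInner_noop (S idx : List Int) (done : Bool) :
    ∀ k, (∀ j, j < k → idx.getD j 0 < S.getD j 0) → pvInnerA S k (idx, done) = (idx, done) := by
  intro k
  induction k with
  | zero => intro _; simp [pvInnerA]
  | succ k ih =>
    intro h
    rw [pvInnerA]
    have : ¬ idx.getD k 0 ≥ S.getD k 0 := not_le.mpr (h k (by omega))
    rw [if_neg this]
    exact ih (fun j hj => h j (by omega))

-- the inner loop on the first k positions ignores an appended last column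
theorem pvInner_append (ds : List Int) (d c : Int) :
    ∀ (k : Nat) (zs : List Int) (done : Bool), k ≤ zs.length → zs.length = ds.length →
      pvInnerA (ds ++ [d]) k (zs ++ [c], done)
        = ((pvInnerA ds k (zs, done)).1 ++ [c], (pvInnerA ds k (zs, done)).2) := by
  intro k
  induction k with
  | zero => intro zs done _ _; simp [pvInnerA]
  | succ k ih =>
    intro zs done hk hlen
    have hkz : k < zs.length := by omega
    have hkd : k < ds.length := by omega
    rw [pvInnerA, pvInnerA]
    rw [List.getD_append _ _ _ _ hkz, List.getD_append _ _ _ _ hkd]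
    by_cases hge : zs.getD k 0 ≥ ds.getD k 0
    · rw [if_pos hge, if_pos hge]
      simp only
      rw [List.set_append_left _ _ hkz]
      by_cases hk0 : k = 0
      · rw [if_pos hk0, if_pos hk0]
        subst hk0
        exact ih (zs.set 0 0) true (by simp) (by simp [hlen])
      · rw [if_neg hk0, if_neg hk0]
        have hk1 : k - 1 < (zs.set k 0).length := by simp; omega
        rw [List.getD_append _ _ _ _ hk1, List.set_append_left _ _ hk1]
        exact ih _ done (by simp; omega) (by simp [hlen])
    · rw [if_neg hge, if_neg hge]
      exact ih zs done (by omega) hlen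

-- one odometer step: 'index[-1] += 1' followed by the carry scan
def pvStep (S idx : List Int) : List Int × Bool :=
  pvInnerA S S.length (idx.set (S.length - 1) (idx.getD (S.length - 1) 0 + 1), false)

theorem pvGetD_snoc_last (l : List Int) (c : Int) : (l ++ [c]).getD l.length 0 = c := by
  rw [List.getD_append_right _ _ _ _ (le_refl _)]
  simp

theorem pvSet_snoc_last (l : List Int) (c v : Int) : (l ++ [c]).set l.length v = l ++ [v] := by
  rw [List.set_append_right _ _ (le_refl _)]
  simp

theorem pvStepLemma (S : List Int) (hne : S ≠ []) (hpos : ∀ d ∈ S, 0 < d) :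
    ∀ k : Int, 0 ≤ k → k < pvProd S →
      (k + 1 < pvProd S → pvStep S (pvDecodeB S k) = (pvDecodeB S (k + 1), false)) ∧
      (k + 1 = pvProd S → (pvStep S (pvDecodeB S k)).2 = true) := by
  induction S using List.reverseRecOn with
  | nil => exact absurd rfl hne
  | append_singleton ds d ih =>
    intro k hk0 hkN
    have hd : 0 < d := hpos d (by simp)
    rw [pvProd_snoc] at hkN ⊢
    set j := PySem.Int.floordiv k d with hj
    set x := PySem.Int.mod k d with hx
    have hxe : x = k % d := by rw [hx, PySem.Int.mod_eq_emod_of_pos hd]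
    have hje : j = k / d := by rw [hj, PySem.Int.floordiv_eq_ediv_of_pos hd]
    have hx0 : 0 ≤ x := by rw [hxe]; exact Int.emod_nonneg k (by omega)
    have hxd : x < d := by rw [hxe]; exact Int.emod_lt_of_pos k hd
    have hkeq : d * j + x = k := by rw [hxe, hje]; exact Int.ediv_add_emod k d
    have hdec : pvDecodeB (ds ++ [d]) k = pvDecodeB ds j ++ [x] := pvDecode_snoc ds d k
    cases ds with
    | nil =>
      -- single dimension
      simp only [pvProd, List.foldl_nil, List.nil_append, one_mul] at hkN ⊢
      have hxk : x = k := by rw [hxe]; exact Int.emod_eq_of_lt hk0 hkN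
      have hdec1 : pvDecodeB [d] k = [k] := by
        rw [show [d] = ([] : List Int) ++ [d] from rfl, pvDecode_snoc, pvDecode_nil, ← hx, hxk]; simp
      constructor
      · intro hlt
        rw [hdec1]
        have hdec2 : pvDecodeB [d] (k + 1) = [k + 1] := by
          rw [show [d] = ([] : List Int) ++ [d] from rfl, pvDecode_snoc, pvDecode_nil]
          rw [PySem.Int.mod_eq_emod_of_pos hd, Int.emod_eq_of_lt (by omega) hlt]
          simp
        rw [hdec2]
        show pvInnerA [d] 1 ([k].set 0 (([k].getD 0 0) + 1), false) = ([k + 1], false)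
        simp only [List.getD_cons_zero, List.set_cons_zero]
        rw [pvInnerA]
        have : ¬ ([k + 1].getD 0 0 ≥ [d].getD 0 0) := by simp; omega
        rw [if_neg this]
        rfl
      · intro heq
        rw [hdec1]
        show (pvInnerA [d] 1 ([k].set 0 (([k].getD 0 0) + 1), false)).2 = true
        simp only [List.getD_cons_zero, List.set_cons_zero]
        rw [pvInnerA]
        have : [k + 1].getD 0 0 ≥ [d].getD 0 0 := by simp; omega
        rw [if_pos this, if_pos rfl]
        rfl
    | cons e ds' =>
      set dd : List Int := e :: ds' with hdd
      have hddne : dd ≠ [] := by simp [hdd]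
      have hm1 : 1 ≤ dd.length := by simp [hdd]
      have hposd : ∀ x ∈ dd, 0 < x := fun x hx => hpos x (by simp [hx])
      have hPpos : 0 < pvProd dd := pvProd_pos dd hposd
      have hj0 : 0 ≤ j := by rw [hje]; exact Int.ediv_nonneg hk0 (by omega)
      have hjP : j < pvProd dd := by
        by_contra hcon
        push_neg at hcon
        have : pvProd dd * d ≤ j * d := by
          exact mul_le_mul_of_nonneg_right hcon (by omega)
        nlinarith
      set m := dd.length with hm
      set ys := pvDecodeB dd j with hys
      have hysl : ys.length = m := pvDecode_length dd j
      -- the state after 'index[-1] += 1'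
      have hstep0 :
          (pvDecodeB (dd ++ [d]) k).set ((dd ++ [d]).length - 1)
            ((pvDecodeB (dd ++ [d]) k).getD ((dd ++ [d]).length - 1) 0 + 1) = ys ++ [x + 1] := by
        rw [hdec]
        have hl : (dd ++ [d]).length - 1 = ys.length := by simp [hysl, hm]
        rw [hl, pvGetD_snoc_last, pvSet_snoc_last]
      have hsl : (dd ++ [d]).length = m + 1 := by simp [hm]
      by_cases hover : x + 1 < d
      · -- no carry: only the last digit changes
        constructor
        · intro _
          unfold pvStep
          rw [hstep0, hsl, pvInnerA]
          have hg1 : (ys ++ [x + 1]).getD m 0 = x + 1 := by rw [← hysl]; exact pvGetD_snoc_last ys (x + 1)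
          have hg2 : (dd ++ [d]).getD m 0 = d := by rw [hm]; exact pvGetD_snoc_last dd d
          rw [hg1, hg2, if_neg (by omega)]
          rw [pvInner_append dd d (x + 1) m ys false (by omega) (by omega)]
          rw [pvInner_noop dd ys false m (fun i hi => by
            have := pvDecode_lt dd hposd j i (by omega)
            rw [← hys] at this; exact this)]
          have hdecn : pvDecodeB (dd ++ [d]) (k + 1) = ys ++ [x + 1] := by
            rw [pvDecode_snoc]
            have hfd : PySem.Int.floordiv (k + 1) d = j := by
              rw [PySem.Int.floordiv_eq_iff_of_pos hd]
              constructor <;> nlinarith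
            have hmd : PySem.Int.mod (k + 1) d = x + 1 := by
              have := PySem.Int.floordiv_mul_add_mod (k + 1) d
              rw [hfd, mul_comm] at this
              omega
            rw [hfd, hmd, ← hys]
          rw [hdecn]
        · intro heq
          exfalso
          have : k + 1 ≤ d * j + d := by omega
          nlinarith
      · -- carry out of the last digit: x + 1 = d
        have hxd1 : x + 1 = d := by omega
        have hset : (ys ++ [x + 1]).set m 0 = ys ++ [0] := by rw [← hysl]; exact pvSet_snoc_last ys (x + 1) 0
        have hys1 : (ys.set (m - 1) (ys.getD (m - 1) 0 + 1)).length = m := by simp [hysl]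
        have hinner :
            pvInnerA (dd ++ [d]) (m + 1) (ys ++ [x + 1], false)
              = ((pvStep dd ys).1 ++ [0], (pvStep dd ys).2) := by
          rw [pvInnerA]
          have hg1 : (ys ++ [x + 1]).getD m 0 = x + 1 := by rw [← hysl]; exact pvGetD_snoc_last ys (x + 1)
          have hg2 : (dd ++ [d]).getD m 0 = d := by rw [hm]; exact pvGetD_snoc_last dd d
          rw [hg1, hg2, if_pos (by omega)]
          simp only
          rw [if_neg (by omega : ¬ m = 0)]
          rw [hset]
          have hglast : (ys ++ [0]).getD (m - 1) 0 = ys.getD (m - 1) 0 := by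
            rw [List.getD_append _ _ _ _ (by omega : m - 1 < ys.length)]
          have hslast : (ys ++ [0]).set (m - 1) (ys.getD (m - 1) 0 + 1)
              = ys.set (m - 1) (ys.getD (m - 1) 0 + 1) ++ [0] := by
            rw [List.set_append_left _ _ (by omega : m - 1 < ys.length)]
          rw [hglast, hslast]
          rw [pvInner_append dd d 0 m _ false (by simp [hysl]) (by simp [hysl, hm])]
          rfl
        have hIH := ih hddne hposd j hj0 hjP
        have hk1 : k + 1 = d * (j + 1) := by
          have hexp : d * (j + 1) = d * j + d := by ring
          omega
        constructor
        · intro hlt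
          have hjlt : j + 1 < pvProd dd := by
            by_contra hcon
            push_neg at hcon
            have : j + 1 = pvProd dd := by omega
            rw [hk1, ← this] at hlt
            nlinarith
          unfold pvStep
          rw [hstep0, hsl, hinner, (hIH.1 hjlt)]
          have hdecn : pvDecodeB (dd ++ [d]) (k + 1) = pvDecodeB dd (j + 1) ++ [0] := by
            rw [pvDecode_snoc]
            have hfd : PySem.Int.floordiv (k + 1) d = j + 1 := by
              rw [PySem.Int.floordiv_eq_iff_of_pos hd]
              constructor <;> nlinarith
            have hmd : PySem.Int.mod (k + 1) d = 0 := by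
              have := PySem.Int.floordiv_mul_add_mod (k + 1) d
              rw [hfd, mul_comm] at this
              omega
            rw [hfd, hmd]
          rw [hdecn]
        · intro _
          unfold pvStep
          rw [hstep0, hsl, hinner]
          have hjeq : j + 1 = pvProd dd ∨ j + 1 < pvProd dd := by omega
          rcases hjeq with hjeq | hjlt
          · exact hIH.2 hjeq
          · exfalso
            -- k + 1 = pvProd dd * d and k + 1 = d * (j+1) with j + 1 < pvProd dd is impossible
            rename_i heq'
            nlinarith [heq']
      
theorem pvMain_inv (S : List Int) (hne : S ≠ []) (hpos : ∀ d ∈ S, 0 < d) :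
    ∀ (fuel : Nat) (k : Int) (acc : List (List Int)), 0 ≤ k → k < pvProd S → fuel = (pvProd S - k).toNat →
      pvMainA S fuel (pvDecodeB S k) acc = acc.reverse ++ (PySem.List.pyRange k (pvProd S) 1).map (pvDecodeB S) := by
  intro fuel
  induction fuel with
  | zero => intro k acc hk0 hkN hf; omega
  | succ fuel ih =>
    intro k acc hk0 hkN hf
    rw [pvMainA]
    have hn : ¬ S.length = 0 := by simpa using (List.length_pos_iff.mpr hne).ne'
    rw [if_neg hn]
    have hstep := pvStepLemma S hne hpos k hk0 hkN
    show (if (pvStep S (pvDecodeB S k)).2 = true then (pvDecodeB S k :: acc).reverse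
          else pvMainA S fuel (pvStep S (pvDecodeB S k)).1 (pvDecodeB S k :: acc))
        = acc.reverse ++ List.map (pvDecodeB S) (PySem.List.pyRange k (pvProd S))
    by_cases hlast : k + 1 = pvProd S
    · rw [hstep.2 hlast, if_pos rfl]
      rw [PySem.List.pyRange_one_cons hkN, PySem.List.pyRange_one_eq_nil (by omega)]
      simp
    · have hlt : k + 1 < pvProd S := by omega
      rw [hstep.1 hlt]
      show (if false = true then (pvDecodeB S k :: acc).reverse
            else pvMainA S fuel (pvDecodeB S (k + 1)) (pvDecodeB S k :: acc))
          = acc.reverse ++ List.map (pvDecodeB S) (PySem.List.pyRange k (pvProd S))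
      rw [if_neg (by simp)]
      rw [ih (k + 1) (pvDecodeB S k :: acc) (by omega) hlt (by omega)]
      rw [PySem.List.pyRange_one_cons hkN]
      simp

theorem pvSizeGo_pos (l : List Int) : ∀ s : Int, (∀ d ∈ l, 0 < d) → pvSizeGo l s = some (l.foldl (· * ·) s) := by
  induction l with
  | nil => intro s _; simp [pvSizeGo]
  | cons d l ih =>
    intro s h
    rw [pvSizeGo, if_neg (by have := h d (by simp); omega)]
    exact ih (s * d) (fun x hx => h x (by simp [hx]))

theorem pvSizeGo_none (l : List Int) : ∀ s : Int, (∃ d ∈ l, d ≤ 0) → pvSizeGo l s = none := by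
  induction l with
  | nil => intro s h; simp at h
  | cons d l ih =>
    intro s h
    by_cases hd : d ≤ 0
    · rw [pvSizeGo, if_pos hd]
    · rw [pvSizeGo, if_neg hd]
      obtain ⟨x, hx, hx0⟩ := h
      rcases List.mem_cons.mp hx with h0 | h0
      · omega
      · exact ih (s * d) ⟨x, h0, hx0⟩

-- ===== VERDICT (by name: the statement is the Claim_ definition above) =====
theorem loop_on_indicies_py_spec : Claim_equal_loop_on_indicies_py := by
  intro shape _hDom hPre
  obtain ⟨hne, hzn⟩ := hPre
  unfold Spec_loop_on_indicies_py
  have hPs : shape.foldl (· * ·) 1 = pvProd shape := rfl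
  by_cases hz : (0:Int) ∈ shape
  · -- a zero dimension: both sides are empty
    have h0 : pvProd shape = 0 := pvProd_zero_of_mem shape hz
    have hB : loop_on_indicies_py_alt shape = [] := by
      unfold loop_on_indicies_py_alt
      rw [pvSizeGo_none shape 1 ⟨0, hz, le_refl 0⟩]
    unfold loop_on_indicies_py
    simp only
    rw [hPs, h0, if_pos rfl, hB]
  · -- no zero and (by Pre_) no negative dimension: every dimension is positive
    have hnn : ∀ d ∈ shape, 0 ≤ d := hzn.resolve_left hz
    have hpos : ∀ d ∈ shape, 0 < d := by
      intro d hd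
      rcases lt_or_eq_of_le (hnn d hd) with h | h
      · exact h
      · exact absurd (h ▸ hd) hz
    have hN : 0 < pvProd shape := pvProd_pos shape hpos
    have h0 : pvProd shape ≠ 0 := by omega
    have hB : loop_on_indicies_py_alt shape
        = (PySem.List.pyRange 0 (pvProd shape) 1).map (pvDecodeB shape) := by
      unfold loop_on_indicies_py_alt
      rw [pvSizeGo_pos shape 1 hpos]
      rfl
    unfold loop_on_indicies_py
    simp only
    rw [hPs, if_neg h0, hB]
    rw [pvMapMax shape hpos]
    rw [← pvDecode_zero shape hpos]
    have := pvMain_inv shape hne hpos (pvProd shape).toNat 0 [] (by omega) hN (by omega)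
    rw [hPs, this]
    simp
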